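-- pv_equiv track=rewrite | github.com/oppermaa/idnr | idnr.py | order_queries
-- ===== SOURCE A (Python) =====
-- def order_queries(domain_name):
--   tokens = domain_name.split('.')
--   name = tokens[-1]
--   queries = [name]
--   for i in range(len(tokens) - 2, -1, -1):
--     name = tokens[i] + '.' + name
--     queries.append(name)
--
--   return queries
-- ===== SOURCE B (Python) =====
-- def order_queries(domain_name):
--   tokens = domain_name.split('.')
--   return ['.'.join(tokens[i:]) for i in range(len(tokens) - 1, -1, -1)]
-- ===== Notes on version B (the rewrite author's own statement) =====
-- stated objective: simpler
-- what changed: Each progressive suffix query is produced independently as '.'.join(tokens[i:]) over a reversed index range, replacing A's incremental running-name accumulator and growing queries list.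
import Mathlib
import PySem

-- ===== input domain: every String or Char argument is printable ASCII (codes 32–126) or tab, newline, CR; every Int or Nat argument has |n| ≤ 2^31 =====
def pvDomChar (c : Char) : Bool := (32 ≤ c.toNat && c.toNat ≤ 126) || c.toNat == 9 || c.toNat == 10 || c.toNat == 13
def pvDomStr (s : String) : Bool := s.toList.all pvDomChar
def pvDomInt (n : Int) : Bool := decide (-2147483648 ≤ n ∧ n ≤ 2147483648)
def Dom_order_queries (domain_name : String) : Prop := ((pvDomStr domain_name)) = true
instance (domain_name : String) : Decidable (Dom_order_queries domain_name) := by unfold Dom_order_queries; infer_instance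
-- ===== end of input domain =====

-- B builds each progressive suffix query directly as '.'.join(tokens[i:]) instead of A's running-accumulator string; objective: simpler decomposition, same cost.

-- ===== PORT A =====
def order_queries (domain_name : String) : List String :=
  let tokens := (PySem.Str.split? domain_name ".").getD []   -- sep "." ≠ "": split? is always some
  match PySem.List.pyGet? tokens (-1) with
  | none => []   -- unreachable: str.split always returns a nonempty list
  | some name =>
    ((PySem.List.pyRange ((tokens.length : Int) - 2) (-1) (-1)).foldl
      (fun (st : String × List String) i =>
        let nm := PySem.List.pyGetD tokens i "" ++ "." ++ st.1
        (nm, st.2 ++ [nm]))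
      (name, [name])).2

-- ===== PORT B =====
def order_queries_alt (domain_name : String) : List String :=
  let tokens := (PySem.Str.split? domain_name ".").getD []   -- sep "." ≠ "": split? is always some
  (PySem.List.pyRange ((tokens.length : Int) - 1) (-1) (-1)).map
    (fun i => PySem.Str.join "." (PySem.List.slice tokens (some i) none))

-- ===== PRECONDITION & SPEC =====
def Spec_order_queries (domain_name : String) (out : List String) : Prop := out = order_queries_alt domain_name
instance (domain_name : String) (out : List String) : Decidable (Spec_order_queries domain_name out) := by unfold Spec_order_queries; infer_instance

-- ===== CLAIM (what is proved, stated in full; the proofs are below) =====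
def Claim_equal_order_queries : Prop := ∀ (domain_name : String), Dom_order_queries domain_name → Spec_order_queries domain_name (order_queries domain_name)

-- ===== LEMMAS AND PROOFS =====

-- Join of the suffix starting at index i (A's running `name` and B's per-query value).
def pvJ (ts : List String) (i : Nat) : String := PySem.Str.join "." (ts.drop i)

lemma pvJ_step (ts : List String) (i : Nat) (h : i + 1 < ts.length) :
    ts.getD i "" ++ "." ++ pvJ ts (i + 1) = pvJ ts i := by
  have h1 : i < ts.length := by omega
  have h2 : ts.drop (i+1) ≠ [] := by
    have := List.length_drop (l := ts) (i := i+1)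
    intro hn; rw [hn] at this; simp at this; omega
  obtain ⟨q, rest, hqr⟩ := List.exists_cons_of_ne_nil h2
  apply String.toList_inj.mp
  rw [pvJ, pvJ, List.drop_eq_getElem_cons h1]
  simp [hqr, PySem.Str.join, PySem.Chars.join_cons_cons, List.getElem?_eq_getElem h1]

lemma pvJ_last (t : String) (rest : List String) :
    pvJ (t :: rest) ((t :: rest).length - 1) = (t :: rest).getLast (by simp) := by
  rw [pvJ, List.drop_length_sub_one (by simp), PySem.Str.join]
  apply String.toList_inj.mp
  simp [PySem.Chars.join_singleton]

lemma pv_loopA (ts : List String) : ∀ (k : Nat), k + 1 < ts.length → ∀ acc : List String,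
    ((PySem.List.pyRange ((k : Nat) : Int) (-1) (-1)).foldl
      (fun (st : String × List String) i =>
        let nm := PySem.List.pyGetD ts i "" ++ "." ++ st.1
        (nm, st.2 ++ [nm]))
      (pvJ ts (k + 1), acc)).2
    = acc ++ (PySem.List.pyRange ((k : Nat) : Int) (-1) (-1)).map (fun i => pvJ ts i.toNat) := by
  intro k
  induction k with
  | zero =>
    intro hk acc
    rw [PySem.List.pyRange_neg_one_cons (by norm_num)]
    rw [PySem.List.pyRange_neg_one_eq_nil (by norm_num)]
    simp only [List.foldl_cons, List.foldl_nil, List.map_cons, List.map_nil]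
    rw [show ((0 : Nat) : Int) = (0 : Int) by norm_num]
    rw [show PySem.List.pyGetD ts (0 : Int) "" = ts.getD 0 "" from PySem.List.pyGetD_natCast ts 0 ""]
    rw [pvJ_step ts 0 (by omega)]
    simp
  | succ k ih =>
    intro hk acc
    rw [PySem.List.pyRange_neg_one_cons (by push_cast; omega)]
    rw [show (((k + 1 : Nat)) : Int) - 1 = ((k : Nat) : Int) by push_cast; ring]
    simp only [List.foldl_cons, List.map_cons]
    rw [show PySem.List.pyGetD ts (((k + 1 : Nat)) : Int) "" = ts.getD (k+1) "" from
      PySem.List.pyGetD_natCast ts (k+1) ""]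
    rw [pvJ_step ts (k+1) (by omega)]
    rw [ih (by omega) (acc ++ [pvJ ts (k+1)])]
    simp [List.append_assoc]

lemma pv_core (ts : List String) :
    (match PySem.List.pyGet? ts (-1) with
     | none => ([] : List String)
     | some name =>
       ((PySem.List.pyRange ((ts.length : Int) - 2) (-1) (-1)).foldl
         (fun (st : String × List String) i =>
           let nm := PySem.List.pyGetD ts i "" ++ "." ++ st.1
           (nm, st.2 ++ [nm]))
         (name, [name])).2)
    = (PySem.List.pyRange ((ts.length : Int) - 1) (-1) (-1)).map
        (fun i => PySem.Str.join "." (PySem.List.slice ts (some i) none)) := by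
  cases ts with
  | nil =>
    rw [PySem.List.pyGet?_neg_one]
    simp
  | cons t rest =>
    have hne : t :: rest ≠ [] := by simp
    have hlen : 1 ≤ (t :: rest).length := by simp
    rw [PySem.List.pyGet?_neg_one, List.getLast?_eq_some_getLast hne]
    have hname : (t :: rest).getLast hne = pvJ (t :: rest) ((t :: rest).length - 1) :=
      (pvJ_last t rest).symm
    -- B side: peel off the first (largest) index
    have hcast1 : ((t :: rest).length : Int) - 1 = (((t :: rest).length - 1 : Nat) : Int) := by
      omega
    have hBmap : ∀ is : List Int, (∀ i ∈ is, (-1:Int) < i) →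
        is.map (fun i => PySem.Str.join "." (PySem.List.slice (t :: rest) (some i) none))
        = is.map (fun i => pvJ (t :: rest) i.toNat) := by
      intro is his
      apply List.map_congr_left
      intro i hi
      rw [PySem.List.slice_from _ (by have := his i hi; omega)]
      rfl
    cases rest with
    | nil =>
      simp only
      rw [PySem.List.pyRange_neg_one_eq_nil (by norm_num)]
      rw [PySem.List.pyRange_neg_one_cons (by norm_num)]
      rw [PySem.List.pyRange_neg_one_eq_nil (by norm_num)]
      simp only [List.foldl_nil, List.map_cons, List.map_nil]
      rw [PySem.List.slice_from _ (by norm_num)]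
      simp [hname, pvJ]
    | cons u us =>
      have h2 : 2 ≤ (t :: u :: us).length := by simp
      have hcast2 : ((t :: u :: us).length : Int) - 2
          = (((t :: u :: us).length - 2 : Nat) : Int) := by omega
      simp only
      rw [hname, hcast2]
      rw [show (t :: u :: us).length - 1 = ((t :: u :: us).length - 2) + 1 by omega]
      rw [pv_loopA (t :: u :: us) ((t :: u :: us).length - 2) (by omega)]
      rw [hcast1, PySem.List.pyRange_neg_one_cons
        (a := (((t :: u :: us).length - 1 : Nat) : Int)) (b := -1) (by omega)]
      rw [List.map_cons]
      rw [PySem.List.slice_from _ (by omega)]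
      rw [hBmap _ (fun i hi => (PySem.List.mem_pyRange_neg_one.mp hi).1)]
      rw [show ((((t :: u :: us).length - 1 : Nat)) : Int) - 1
          = (((t :: u :: us).length - 2 : Nat) : Int) by omega]
      rw [show (t :: u :: us).length - 2 + 1 = (t :: u :: us).length - 1 by omega]
      simp [pvJ]

-- ===== VERDICT (by name: the statement is the Claim_ definition above) =====
theorem order_queries_spec : Claim_equal_order_queries := by
  intro d _
  unfold Spec_order_queries order_queries order_queries_alt
  exact pv_core _
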